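-- pv_equiv track=rewrite | github.com/violetDelia/kernelcode_generate | kernel_gen/dsl/gen_kernel/emit/npu_demo/dma/alloc.py | _default_stride_values
-- ===== SOURCE A (Python) =====
-- def _stride_term(value: str) -> str:
--     """格式化参与 stride 乘法的单项。
--
--     功能说明:
--     - 简单变量和整数保持原样，复合表达式加括号以稳定 C++ 优先级。
--
--     使用示例:
--     - term = _stride_term("m + 1")
--     """
--
--     if value.isidentifier() or value.isdecimal():
--         return value
--     return f"({value})"
--
-- def _default_stride_values(shape_values: list[str]) -> list[str]:
--     """根据完整 shape 参数生成默认连续 stride 参数。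
--
--     功能说明:
--     - npu_demo `dma.alloc` helper 以公开默认连续布局接收 shape/stride。
--     - 使用已映射的 C++ shape 表达式生成 stride，避免重新消费 IR type 文本。
--
--     使用示例:
--     - strides = _default_stride_values(["m", "3", "n"])
--     """
--
--     stride_values: list[str] = []
--     running_terms: list[str] = []
--     for value in reversed(shape_values):
--         stride_values.append("*".join(running_terms) if running_terms else "1")
--         if value != "1":
--             running_terms.insert(0, _stride_term(value))
--     stride_values.reverse()
--     return stride_values
-- ===== SOURCE B (Python) =====
-- def _stride_term(value: str) -> str:
--     if value.isidentifier() or value.isdecimal():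
--         return value
--     return f"({value})"
--
-- def _default_stride_values(shape_values: list[str]) -> list[str]:
--     # Recursive forward decomposition: the stride for position i is computed
--     # directly from the suffix shape_values[i+1:]; no running accumulator,
--     # no reversed traversal, no final reverse.
--     if not shape_values:
--         return []
--     rest = shape_values[1:]
--     terms = [_stride_term(v) for v in rest if v != "1"]
--     return [("*".join(terms) if terms else "1")] + _default_stride_values(rest)
-- ===== Notes on version B (the rewrite author's own statement) =====
-- stated objective: simpler
-- what changed: Replaced the reversed loop with its running_terms accumulator, appended stride list and final reverse by a forward structural recursion that computes each stride directly from the remaining suffix and conses the results in order.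
import Mathlib
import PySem

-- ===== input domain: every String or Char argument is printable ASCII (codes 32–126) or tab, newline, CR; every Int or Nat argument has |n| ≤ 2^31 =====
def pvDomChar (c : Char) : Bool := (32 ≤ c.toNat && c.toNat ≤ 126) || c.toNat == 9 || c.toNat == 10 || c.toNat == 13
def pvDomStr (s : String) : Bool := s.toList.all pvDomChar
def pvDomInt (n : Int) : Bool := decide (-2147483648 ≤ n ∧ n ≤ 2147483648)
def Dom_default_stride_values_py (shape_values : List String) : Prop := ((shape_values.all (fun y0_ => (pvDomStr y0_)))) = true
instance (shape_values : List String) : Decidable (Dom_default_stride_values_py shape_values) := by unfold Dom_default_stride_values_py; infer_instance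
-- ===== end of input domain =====

-- One honest line: B replaces A's reversed accumulator loop (+ final reverse) by a
-- forward structural recursion that recomputes each stride from the suffix; objective: simpler.

-- ===== PORT A =====
-- str.isidentifier(), ported by hand: exact on the ASCII domain (first char letter or '_',
-- rest letters/digits/'_'); Unicode identifiers are outside Dom.
def pyIsIdentifier (s : String) : Bool :=
  match s.toList with
  | [] => false
  | c :: cs => (PySem.Chars.isalpha c || c == '_') && cs.all (fun d => PySem.Chars.isalnum d || d == '_')

-- str.isdecimal(), ported by hand: exact on the ASCII domain (nonempty, all '0'..'9').
def pyIsDecimal (s : String) : Bool :=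
  match s.toList with
  | [] => false
  | l => l.all PySem.Chars.isdigit

-- helper _stride_term (shared by A and B in the Python sources too)
def pyStrideTerm (value : String) : String :=
  if pyIsIdentifier value || pyIsDecimal value then value
  else PySem.Str.join "" ["(", value, ")"]

-- one iteration of A's loop body (state = (stride_values, running_terms))
def stepA (st : List String × List String) (value : String) : List String × List String :=
  (st.1 ++ [if st.2 ≠ [] then PySem.Str.join "*" st.2 else "1"],
   if value ≠ "1" then pyStrideTerm value :: st.2 else st.2)

def default_stride_values_py (shape_values : List String) : List String :=
  ((shape_values.reverse.foldl stepA ([], [])).1).reverse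

-- ===== PORT B =====
def default_stride_values_py_alt : List String → List String
  | [] => []
  | _ :: rest =>
    let terms := (rest.filter (fun v => v ≠ "1")).map pyStrideTerm
    (if terms = [] then "1" else PySem.Str.join "*" terms) :: default_stride_values_py_alt rest

-- ===== PRECONDITION & SPEC =====
def Spec_default_stride_values_py (shape_values : List String) (out : List String) : Prop := out = default_stride_values_py_alt shape_values
instance (shape_values : List String) (out : List String) : Decidable (Spec_default_stride_values_py shape_values out) := by unfold Spec_default_stride_values_py; infer_instance

-- ===== CLAIM (what is proved, stated in full; the proofs are below) =====
def Claim_equal_default_stride_values_py : Prop := ∀ (shape_values : List String), Dom_default_stride_values_py shape_values → Spec_default_stride_values_py shape_values (default_stride_values_py shape_values)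

-- ===== LEMMAS AND PROOFS =====

-- A's running_terms after folding over l from rt are the filtered terms of l, reversed, on top of rt
theorem foldA_snd (l : List String) (acc rt : List String) :
    (l.foldl stepA (acc, rt)).2
      = ((l.filter (fun v => v ≠ "1")).map pyStrideTerm).reverse ++ rt := by
  induction l generalizing acc rt with
  | nil => simp
  | cons v t ih =>
    simp only [List.foldl_cons, stepA, List.filter_cons]
    by_cases hv : v = "1"
    · simp [hv, ih]
    · simp [hv, ih]

theorem ab_eq (sv : List String) :
    default_stride_values_py sv = default_stride_values_py_alt sv := by
  induction sv with
  | nil => rfl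
  | cons v rest ih =>
    unfold default_stride_values_py at ih ⊢
    rw [List.reverse_cons, List.foldl_append]
    simp only [List.foldl_cons, List.foldl_nil, stepA, List.reverse_append,
      List.reverse_cons, List.reverse_nil, List.nil_append, List.singleton_append]
    rw [foldA_snd]
    simp only [List.reverse_reverse, List.append_nil, List.filter_reverse, List.map_reverse]
    rw [default_stride_values_py_alt]
    refine congrArg₂ _ ?_ ih
    cases hE : (rest.filter (fun v => v ≠ "1")).map pyStrideTerm with
    | nil => rfl
    | cons a t => rw [if_pos (by simp), if_neg (by simp)]

-- ===== VERDICT (by name: the statement is the Claim_ definition above) =====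
theorem default_stride_values_py_spec : Claim_equal_default_stride_values_py := by
  intro sv _
  unfold Spec_default_stride_values_py
  exact ab_eq sv
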